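-- pv_equiv track=rewrite | github.com/mcgalcode/rxn-ca | src/rxn_ca/analysis/visualization/reaction_artist_3D.py | formula_to_latex
-- ===== SOURCE A (Python) =====
-- def formula_to_latex(formula):
--     """Convert a chemical formula to a LaTeX formatted string."""
--     result = ""
--     i = 0
--     while i < len(formula):
--         if formula[i].isdigit():
--             result += '$_{' + formula[i]
--             while i + 1 < len(formula) and formula[i + 1].isdigit():
--                 result += formula[i + 1]
--                 i += 1
--             result += '}$'
--         else:
--             result += formula[i]
--         i += 1
--     return result
-- ===== SOURCE B (Python) =====
-- import re
--
-- def formula_to_latex(formula):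
--     """Convert a chemical formula to a LaTeX formatted string."""
--     return re.sub(r'\d+', lambda m: '$_{' + m.group() + '}$', formula)
-- ===== Notes on version B (the rewrite author's own statement) =====
-- stated objective: faster
-- what changed: The manual index-driven while loop with an inner digit-lookahead loop and repeated string concatenation is replaced by a single re.sub over maximal digit runs, wrapping each run once via a replacement lambda and building the output in one pass.
import Mathlib
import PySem

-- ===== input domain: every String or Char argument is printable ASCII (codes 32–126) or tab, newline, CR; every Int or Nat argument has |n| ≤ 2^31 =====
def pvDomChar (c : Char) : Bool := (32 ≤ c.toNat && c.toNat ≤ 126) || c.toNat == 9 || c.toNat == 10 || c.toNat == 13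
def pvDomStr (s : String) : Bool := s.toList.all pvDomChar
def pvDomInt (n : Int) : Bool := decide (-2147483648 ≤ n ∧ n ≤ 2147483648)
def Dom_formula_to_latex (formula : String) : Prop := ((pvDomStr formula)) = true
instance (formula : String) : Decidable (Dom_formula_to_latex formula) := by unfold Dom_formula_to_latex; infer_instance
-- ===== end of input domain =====

-- B replaces A's manual index loop with inner digit-lookahead by a single regex-style
-- substitution of each maximal digit run (re.sub in Python; run-splitting here); objective: idiomatic.

-- ===== PORT A =====
-- inner while: 'while i+1 < len and formula[i+1].isdigit(): result += formula[i+1]; i += 1'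
-- (the remaining characters after position i are the list argument; returns the grown result and the rest)
def ftlInnerA : List Char → List Char → List Char × List Char
  | [], res => (res, [])
  | c :: cs, res =>
    if PySem.Chars.isdigit c then ftlInnerA cs (res ++ [c]) else (res, c :: cs)

theorem ftlInnerA_len (cs res : List Char) : (ftlInnerA cs res).2.length ≤ cs.length := by
  induction cs generalizing res with
  | nil => simp [ftlInnerA]
  | cons c cs ih =>
    simp only [ftlInnerA]
    split
    · exact le_trans (ih _) (Nat.le_succ _)
    · simp

-- outer while over index i, carried as the suffix of formula from i on
def ftlLoopA : List Char → List Char → List Char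
  | [], res => res
  | c :: cs, res =>
    if PySem.Chars.isdigit c then
      let p := ftlInnerA cs (res ++ ('$' :: '_' :: '{' :: [c]))
      ftlLoopA p.2 (p.1 ++ ['}', '$'])
    else
      ftlLoopA cs (res ++ [c])
termination_by cs _ => cs.length
decreasing_by
  · exact Nat.lt_succ_of_le (ftlInnerA_len _ _)
  · simp

def formula_to_latex (formula : String) : String :=
  String.ofList (ftlLoopA formula.toList [])

-- ===== PORT B =====
-- re.sub(r'\d+', lambda m: '$_{' + m.group() + '}$', formula): each maximal run of
-- digits is taken at once (takeWhile/dropWhile) and wrapped; non-digits pass through.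
def ftlSubB : List Char → List Char
  | [] => []
  | c :: cs =>
    if PySem.Chars.isdigit c then
      ('$' :: '_' :: '{' :: (c :: cs).takeWhile PySem.Chars.isdigit ++ ['}', '$'])
        ++ ftlSubB ((c :: cs).dropWhile PySem.Chars.isdigit)
    else
      c :: ftlSubB cs
termination_by cs => cs.length
decreasing_by
  · simp only [List.dropWhile]
    split
    · exact Nat.lt_succ_of_le (List.length_dropWhile_le _ _)
    · simp_all
  · simp

def formula_to_latex_alt (formula : String) : String :=
  String.ofList (ftlSubB formula.toList)

-- ===== PRECONDITION & SPEC =====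
def Spec_formula_to_latex (formula : String) (out : String) : Prop := out = formula_to_latex_alt formula
instance (formula : String) (out : String) : Decidable (Spec_formula_to_latex formula out) := by unfold Spec_formula_to_latex; infer_instance

-- ===== CLAIM (what is proved, stated in full; the proofs are below) =====
def Claim_equal_formula_to_latex : Prop := ∀ (formula : String), Dom_formula_to_latex formula → Spec_formula_to_latex formula (formula_to_latex formula)

-- ===== LEMMAS AND PROOFS =====
theorem ftlInnerA_eq (cs res : List Char) :
    ftlInnerA cs res =
      (res ++ cs.takeWhile PySem.Chars.isdigit, cs.dropWhile PySem.Chars.isdigit) := by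
  induction cs generalizing res with
  | nil => simp [ftlInnerA]
  | cons c cs ih =>
    simp only [ftlInnerA, List.takeWhile, List.dropWhile]
    split
    · simp_all
    · simp_all

theorem ftlLoopA_eq (cs res : List Char) : ftlLoopA cs res = res ++ ftlSubB cs := by
  induction cs using ftlSubB.induct generalizing res with
  | case1 => simp [ftlLoopA, ftlSubB]
  | case2 c cs hd ih =>
    rw [ftlLoopA, ftlSubB, if_pos hd, if_pos hd]
    simp only [ftlInnerA_eq]
    rw [show (c :: cs).dropWhile PySem.Chars.isdigit = cs.dropWhile PySem.Chars.isdigit by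
      simp [List.dropWhile, hd]] at ih ⊢
    rw [ih]
    simp [List.takeWhile, hd]
  | case3 c cs hd ih =>
    rw [ftlLoopA, ftlSubB, if_neg hd, if_neg hd, ih]
    simp

-- ===== VERDICT (by name: the statement is the Claim_ definition above) =====
theorem formula_to_latex_spec : Claim_equal_formula_to_latex := by
  intro formula _
  unfold Spec_formula_to_latex formula_to_latex formula_to_latex_alt
  rw [ftlLoopA_eq]
  simp
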